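-- pv_equiv track=rewrite | github.com/kirstengott/scripts | slide_window_fasta.py | count_kmers
-- ===== SOURCE A (Python) =====
-- def count_kmers(kmer_length, sequence):
--     kmer_dict = {}
--     for i in range(0, len(sequence) - kmer_length +1):
--         # extract the kmer as a substring
--         kmer = sequence[i:(i+kmer_length)]
--         if kmer in kmer_dict:
--             kmer_dict[kmer] += 1
--         else:
--             kmer_dict[kmer] = 1
--
--     count_distinct = 0
--     for k in kmer_dict:
--         count_distinct += 1
--     return(count_distinct)
-- ===== SOURCE B (Python) =====
-- def count_kmers(kmer_length, sequence):
--     # sort-then-scan: sort all k-mers, then count group heads in one linear pass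
--     kmers = sorted(sequence[i:i + kmer_length] for i in range(len(sequence) - kmer_length + 1))
--     count = 0
--     prev = None
--     for km in kmers:
--         if km != prev:
--             count += 1
--             prev = km
--     return count
-- ===== Notes on version B (the rewrite author's own statement) =====
-- stated objective: alternative
-- what changed: A counts distinct k-mers by building a hash dict of counts and then iterating its keys; B collects the k-mers, sorts them, and counts group heads (entries differing from their predecessor) in one linear scan, never building a dictionary.
import Mathlib
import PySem

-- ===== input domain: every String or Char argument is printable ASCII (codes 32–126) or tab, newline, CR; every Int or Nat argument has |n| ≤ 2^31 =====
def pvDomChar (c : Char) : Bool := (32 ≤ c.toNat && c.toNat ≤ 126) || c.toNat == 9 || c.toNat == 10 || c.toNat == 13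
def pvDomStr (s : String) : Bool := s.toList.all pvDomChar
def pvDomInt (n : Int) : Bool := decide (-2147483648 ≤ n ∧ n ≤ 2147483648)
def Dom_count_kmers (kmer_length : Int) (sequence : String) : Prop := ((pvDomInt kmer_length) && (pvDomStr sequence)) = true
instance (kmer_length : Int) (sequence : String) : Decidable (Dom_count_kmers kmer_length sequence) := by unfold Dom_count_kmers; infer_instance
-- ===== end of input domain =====

-- B replaces A's dict-of-counts with sort-then-scan over the k-mer list (alternative algorithm, same results).

-- ===== PORT A =====
def count_kmers (kmer_length : Int) (sequence : String) : Int :=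
  let kmer_dict : PySem.Dict String Int :=
    (PySem.List.pyRange 0 (PySem.Str.len sequence - kmer_length + 1) 1).foldl
      (fun d i =>
        let kmer := PySem.Str.slice sequence (some i) (some (i + kmer_length))
        if d.contains kmer then d.insert kmer (d.getD kmer 0 + 1)
        else d.insert kmer 1)
      PySem.Dict.empty
  kmer_dict.keys.foldl (fun c _ => c + 1) 0

-- ===== PORT B =====
def count_kmers_alt (kmer_length : Int) (sequence : String) : Int :=
  let kmers : List String :=
    PySem.List.sorted
      ((PySem.List.pyRange 0 (PySem.Str.len sequence - kmer_length + 1) 1).map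
        (fun i => PySem.Str.slice sequence (some i) (some (i + kmer_length))))
      (fun x => x) false
  (kmers.foldl
    (fun (st : Int × Option String) km =>
      if some km ≠ st.2 then (st.1 + 1, some km) else st)
    ((0 : Int), (none : Option String))).1

-- ===== PRECONDITION & SPEC =====
def Spec_count_kmers (kmer_length : Int) (sequence : String) (out : Int) : Prop := out = count_kmers_alt kmer_length sequence
instance (kmer_length : Int) (sequence : String) (out : Int) : Decidable (Spec_count_kmers kmer_length sequence out) := by unfold Spec_count_kmers; infer_instance

-- ===== CLAIM (what is proved, stated in full; the proofs are below) =====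
def Claim_equal_count_kmers : Prop := ∀ (kmer_length : Int) (sequence : String), Dom_count_kmers kmer_length sequence → Spec_count_kmers kmer_length sequence (count_kmers kmer_length sequence)

-- ===== LEMMAS AND PROOFS =====

-- A's second loop just counts the keys
theorem foldl_count_eq_length {α : Type} (l : List α) (c : Int) :
    l.foldl (fun c _ => c + 1) c = c + l.length := by
  induction l generalizing c with
  | nil => simp
  | cons x xs ih => simp [List.foldl, ih]; ring

theorem card_insert_eq_card_erase_add_one (x : String) (s : Finset String) :
    (insert x s).card = (s.erase x).card + 1 := by
  by_cases h : x ∈ s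
  · rw [Finset.insert_eq_self.mpr h, Finset.card_erase_of_mem h]
    have := Finset.card_pos.mpr ⟨x, h⟩
    omega
  · rw [Finset.card_insert_of_notMem h, Finset.erase_eq_of_notMem h]

-- the scan over a sorted list counts the distinct elements (minus the one already seen)
theorem scan_sorted (P : List String) :
    ∀ (prev : Option String) (c : Int),
      P.Pairwise (· ≤ ·) →
      (∀ p, prev = some p → ∀ x ∈ P, p ≤ x) →
      (P.foldl (fun (st : Int × Option String) km =>
          if some km ≠ st.2 then (st.1 + 1, some km) else st) (c, prev)).1
        = c + ((match prev with
                | none => P.toFinset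
                | some p => P.toFinset.erase p).card : Int) := by
  induction P with
  | nil =>
    intro prev c _ _
    cases prev <;> simp
  | cons x xs ih =>
    intro prev c hpw hlb
    have hx : ∀ y ∈ xs, x ≤ y := (List.pairwise_cons.mp hpw).1
    have hxs : xs.Pairwise (· ≤ ·) := (List.pairwise_cons.mp hpw).2
    by_cases hne : some x ≠ prev
    · simp only [List.foldl, if_pos hne]
      rw [ih (some x) (c + 1) hxs (by intro p hp; injection hp with hp; subst hp; exact hx)]
      have hcard : (insert x xs.toFinset).card = (xs.toFinset.erase x).card + 1 :=
        card_insert_eq_card_erase_add_one x xs.toFinset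
      cases prev with
      | none =>
        simp only [List.toFinset_cons, hcard]
        push_cast
        ring
      | some p =>
        have hpx : p ≠ x := fun h => hne (by rw [h])
        have hpnot : p ∉ insert x xs.toFinset := by
          intro hmem
          rcases Finset.mem_insert.mp hmem with h | h
          · exact hpx h
          · have h1 : p ≤ x := hlb p rfl x (by simp)
            have h2 : x ≤ p := hx p (List.mem_toFinset.mp h)
            exact hpx (le_antisymm h1 h2)
        simp only [List.toFinset_cons, Finset.erase_eq_of_notMem hpnot, hcard]
        push_cast
        ring
    · rw [not_ne_iff] at hne
      obtain rfl := hne.symm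
      simp only [List.foldl, if_neg (show ¬ some x ≠ some x by simp)]
      rw [ih (some x) c hxs (by intro p hp; injection hp with hp; subst hp; exact hx)]
      simp

-- the length of set(L) is the card of L's Finset
theorem ofList_length_eq_toFinset_card (L : List String) :
    (PySem.Set.ofList L).length = L.toFinset.card := by
  have hnd : (PySem.Set.ofList L).Nodup := PySem.Set.nodup_ofList L
  have hfs : (PySem.Set.ofList L).toFinset = L.toFinset := by
    ext x; simp
  have h := List.toFinset_card_of_nodup hnd
  rw [hfs] at h
  exact h.symm

-- a permutation has the same Finset of elements
theorem perm_toFinset_eq (l l' : List String) (h : l.Perm l') : l.toFinset = l'.toFinset := by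
  ext x; simp [h.mem_iff]

-- ===== VERDICT (by name: the statement is the Claim_ definition above) =====
theorem count_kmers_spec : Claim_equal_count_kmers := by
  intro kmer_length sequence _
  unfold Spec_count_kmers count_kmers count_kmers_alt
  set L : List String :=
    (PySem.List.pyRange 0 (PySem.Str.len sequence - kmer_length + 1) 1).map
      (fun i => PySem.Str.slice sequence (some i) (some (i + kmer_length))) with hL
  -- A-side: rewrite the dict-building loop as a fold over L with a uniform insert body
  have hA : (PySem.List.pyRange 0 (PySem.Str.len sequence - kmer_length + 1) 1).foldl
      (fun d i =>
        let kmer := PySem.Str.slice sequence (some i) (some (i + kmer_length))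
        if d.contains kmer then d.insert kmer (d.getD kmer 0 + 1)
        else d.insert kmer 1)
      PySem.Dict.empty
      = L.foldl (fun (d : PySem.Dict String Int) x =>
          d.insert x (if d.contains x then d.getD x 0 + 1 else 1)) PySem.Dict.empty := by
    rw [hL, List.foldl_map]
    congr 1
    funext d i
    by_cases h : d.contains (PySem.Str.slice sequence (some i) (some (i + kmer_length))) <;>
      simp [h]
  rw [hA, foldl_count_eq_length, PySem.Dict.keys_foldl_insert]
  have hkeys : PySem.Set.update (PySem.Dict.empty : PySem.Dict String Int).keys L
      = PySem.Set.ofList L := by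
    simp [PySem.Set.update, PySem.Set.ofList_eq_foldl, PySem.Dict.keys_empty]
  rw [hkeys]
  -- B-side
  set P := PySem.List.sorted L (fun x => x) false with hP
  have hpw : P.Pairwise (· ≤ ·) := by
    have := PySem.List.sorted_pairwise (xs := L) (key := fun x => x)
    simpa using this
  rw [scan_sorted P none 0 hpw (by intro p h; cases h)]
  have hperm : P.Perm L := PySem.List.sorted_perm L (fun x => x) false
  rw [perm_toFinset_eq P L hperm, ofList_length_eq_toFinset_card]
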